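-- pv_equiv track=rewrite | github.com/Kanatik6/cars_catalog | cars/tasks.py | normalize_str
-- ===== SOURCE A (Python) =====
-- def normalize_str(str: str) -> str:
--     space = True
--     list_delete = list()
--     list_ = list(str.strip().replace(' ','_').replace('-',' '))
--     for index,letter in enumerate(list_):
--         if space == True and letter == '_':
--             list_delete.append(index)
--         elif space == True and letter !='_':
--             space = False
--         elif letter == '_':
--             space = True
--     list_delete = [list_.pop(value)for value in reversed(list_delete)]
--
--     return ''.join(list_)
-- ===== SOURCE B (Python) =====
-- def normalize_str(str: str) -> str:
--     s = str.strip().replace(' ', '_').replace('-', ' ')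
--     out = []
--     prev = '_'  # pretend-underscore start so leading underscores are dropped
--     for c in s:
--         if c != '_' or prev != '_':
--             out.append(c)
--         prev = c
--     return ''.join(out)
-- ===== Notes on version B (the rewrite author's own statement) =====
-- stated objective: faster
-- what changed: Replaced the two-phase design (state machine collecting deletion indices, then popping each with list.pop) by a single pass that emits each character directly unless it is an underscore preceded by an underscore (or at the start); no index list and no O(n) pops.
import Mathlib
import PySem

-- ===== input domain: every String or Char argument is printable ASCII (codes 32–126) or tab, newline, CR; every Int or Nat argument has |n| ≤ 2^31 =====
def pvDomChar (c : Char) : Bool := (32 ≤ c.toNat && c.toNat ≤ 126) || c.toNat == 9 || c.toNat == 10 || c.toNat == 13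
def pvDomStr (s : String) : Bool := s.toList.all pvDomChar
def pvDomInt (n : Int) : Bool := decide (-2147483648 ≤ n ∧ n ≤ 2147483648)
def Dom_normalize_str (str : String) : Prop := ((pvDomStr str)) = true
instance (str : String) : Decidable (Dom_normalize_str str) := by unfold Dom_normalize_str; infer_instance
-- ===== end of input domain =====

-- B replaces A's two-phase index-collection-then-reverse-pop deletion by one pass that emits
-- each char unless it is an underscore preceded by an underscore (or at the start): simpler.

-- ===== PORT A =====
-- the loop body of A's for-loop (branches in A's order, state = (space, list_delete))
def pvStepA (st : Bool × List Int) (p : Int × Char) : Bool × List Int :=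
  if st.1 = true ∧ p.2 = '_' then (st.1, st.2 ++ [p.1])
  else if st.1 = true ∧ p.2 ≠ '_' then (false, st.2)
  else if p.2 = '_' then (true, st.2)
  else st

-- one 'list_.pop(value)' step keeping the mutated list; pop? = none would be Python's
-- IndexError, unreachable here since every collected index is valid
def pvPopA (l : List Char) (v : Int) : List Char :=
  match PySem.List.pop? l v with
  | some (_, rest) => rest
  | none => l

def normalize_str (str : String) : String :=
  let list0 := (PySem.Str.replace (PySem.Str.replace (PySem.Str.strip str) " " "_") "-" " ").toList
  let st := (PySem.List.enumerate list0).foldl pvStepA (true, [])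
  -- [list_.pop(value) for value in reversed(list_delete)] mutates list_; join of chars = String.mk
  let final := st.2.reverse.foldl pvPopA list0
  String.ofList final

-- ===== PORT B =====
def normalize_str_alt (str : String) : String :=
  let s := (PySem.Str.replace (PySem.Str.replace (PySem.Str.strip str) " " "_") "-" " ").toList
  -- for c in s: append c unless c == '_' == prev; state = (out, prev)
  let st := s.foldl (fun (st : List Char × Char) c =>
      (if c ≠ '_' ∨ st.2 ≠ '_' then st.1 ++ [c] else st.1, c)) ([], '_')
  String.ofList st.1

-- ===== PRECONDITION & SPEC =====
def Spec_normalize_str (str : String) (out : String) : Prop := out = normalize_str_alt str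
instance (str : String) (out : String) : Decidable (Spec_normalize_str str out) := by unfold Spec_normalize_str; infer_instance

-- ===== CLAIM (what is proved, stated in full; the proofs are below) =====
def Claim_equal_normalize_str : Prop := ∀ (str : String), Dom_normalize_str str → Spec_normalize_str str (normalize_str str)

-- ===== LEMMAS AND PROOFS =====

-- the indices A's loop collects, relative to the current position; flag = "at start or after '_'"
def pvDelIdx : Bool → List Char → List Int
  | _, [] => []
  | b, c :: r => (if b ∧ c = '_' then [(0 : Int)] else []) ++ (pvDelIdx (c = '_') r).map (· + 1)

-- the normalized result: drop '_' when the flag is set, otherwise keep the char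
def pvKeep : Bool → List Char → List Char
  | _, [] => []
  | b, c :: r => if b ∧ c = '_' then pvKeep true r else c :: pvKeep (c = '_') r

theorem pvDelIdx_nonneg (l : List Char) (b : Bool) (x : Int) (hx : x ∈ pvDelIdx b l) : 0 ≤ x := by
  induction l generalizing b x with
  | nil => simp [pvDelIdx] at hx
  | cons c r ih =>
    simp only [pvDelIdx, List.mem_append, List.mem_map] at hx
    rcases hx with hx | ⟨y, hy, rfl⟩
    · split at hx <;> simp_all
    · have := ih (c = '_') y hy; omega

-- A's fold over enumerate: second component accumulates the collected indices shifted by the start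
theorem pvFoldA_eq (l : List Char) (b : Bool) (acc : List Int) (i : Int) :
    ((PySem.List.enumerate l i).foldl pvStepA (b, acc)).2 =
      acc ++ (pvDelIdx b l).map (· + i) := by
  induction l generalizing b acc i with
  | nil => simp [PySem.List.enumerate_nil, pvDelIdx]
  | cons c r ih =>
    rw [PySem.List.enumerate_cons]
    simp only [List.foldl_cons]
    have hstep : pvStepA (b, acc) (i, c) =
        ((c = '_' : Bool), acc ++ (if b ∧ c = '_' then [i] else [])) := by
      simp only [pvStepA]
      by_cases hb : b = true <;> by_cases hc : c = '_' <;> simp [hb, hc]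
    rw [hstep, ih]
    by_cases hb : b = true <;> by_cases hc : c = '_' <;>
      simp [pvDelIdx, hb, hc, List.map_map] <;> exact fun a _ => by ring

-- popping at shifted indices never touches the head
theorem pvPopA_succ (c : Char) (r : List Char) (x : Int) (hx : 0 ≤ x) :
    pvPopA (c :: r) (x + 1) = c :: pvPopA r x := by
  obtain ⟨n, rfl⟩ := Int.eq_ofNat_of_zero_le hx
  by_cases h : n < r.length
  · have h1 : n + 1 < (c :: r).length := by simp; omega
    have e1 : ((n : Int) + 1) = ((n + 1 : Nat) : Int) := by push_cast; ring
    rw [pvPopA, pvPopA, e1, PySem.List.pop?_natCast _ _ h1, PySem.List.pop?_natCast _ _ h]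
    simp [List.eraseIdx]
  · have e1 : PySem.List.pop? r (n : Int) = none := by
      simp [PySem.List.pop?, PySem.List.pyIdx?]; omega
    have e2 : PySem.List.pop? (c :: r) ((n : Int) + 1) = none := by
      simp only [PySem.List.pop?, PySem.List.pyIdx?]
      rw [if_pos (by omega), if_neg (by simp; omega)]
      simp
    rw [pvPopA, pvPopA, e1, e2]

theorem pvFold_pop_shift (xs : List Int) (c : Char) (r : List Char)
    (hxs : ∀ x ∈ xs, 0 ≤ x) :
    (xs.map (· + 1)).foldl pvPopA (c :: r) = c :: xs.foldl pvPopA r := by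
  induction xs generalizing r with
  | nil => simp
  | cons x t ih =>
    simp only [List.map_cons, List.foldl_cons]
    rw [pvPopA_succ c r x (hxs x (by simp))]
    exact ih _ (fun y hy => hxs y (by simp [hy]))

-- the reversed pops of the collected indices compute pvKeep
theorem pvPops_eq_keep (l : List Char) (b : Bool) :
    (pvDelIdx b l).reverse.foldl pvPopA l = pvKeep b l := by
  induction l generalizing b with
  | nil => simp [pvDelIdx, pvKeep]
  | cons c r ih =>
    simp only [pvDelIdx, List.reverse_append, List.foldl_append]
    rw [← List.map_reverse, pvFold_pop_shift _ c r
        (fun x hx => pvDelIdx_nonneg r (c = '_') x (by simpa using hx)), ih]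
    by_cases hb : b = true <;> by_cases hc : c = '_' <;>
      simp [pvKeep, hb, hc, pvPopA, PySem.List.pop?_zero_cons]

-- B's single pass computes pvKeep with flag "prev = '_'"
theorem pvFoldB_eq (l : List Char) (acc : List Char) (p : Char) :
    (l.foldl (fun (st : List Char × Char) c =>
      (if c ≠ '_' ∨ st.2 ≠ '_' then st.1 ++ [c] else st.1, c)) (acc, p)).1 =
      acc ++ pvKeep (p = '_') l := by
  induction l generalizing acc p with
  | nil => simp [pvKeep]
  | cons c r ih =>
    simp only [List.foldl_cons]
    rw [ih]
    by_cases hp : p = '_' <;> by_cases hc : c = '_' <;>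
      simp [pvKeep, hp, hc]

-- ===== VERDICT (by name: the statement is the Claim_ definition above) =====
theorem normalize_str_spec : Claim_equal_normalize_str := by
  intro str _
  unfold Spec_normalize_str normalize_str normalize_str_alt
  set l := (PySem.Str.replace (PySem.Str.replace (PySem.Str.strip str) " " "_") "-" " ").toList with hl
  have hA : ((PySem.List.enumerate l).foldl pvStepA (true, [])).2 = pvDelIdx true l := by
    have := pvFoldA_eq l true [] 0
    simpa using this
  simp only [hA, pvPops_eq_keep l true, pvFoldB_eq l [] '_']
  simp
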